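-- pv_equiv track=rewrite | github.com/canglan-data/bisheng | src/backend/bisheng/database/models/group.py | parse_parent_code
-- ===== SOURCE A (Python) =====
-- from typing import Dict, List, Optional, Any
--
-- def parse_parent_code(group_code: str) -> List[str]:
--     """ 解析出父部门的code """
--     code_list = group_code.split('|')
--     if len(code_list) == 1:
--         return []
--     res = []
--     prev = ''
--     for one in code_list[:-1]:
--         prev = f'{prev}|{one}' if prev else one
--         res.append(prev)
--     return res
-- ===== SOURCE B (Python) =====
-- from typing import List
--
-- def parse_parent_code(group_code: str) -> List[str]:
--     """ 解析出父部门的code """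
--     code_list = group_code.split('|')
--     return ['|'.join(code_list[:i + 1]) for i in range(len(code_list) - 1)]
-- ===== Notes on version B (the rewrite author's own statement) =====
-- stated objective: idiomatic
-- what changed: B drops A's running accumulator variable (and the length-1 early return) and recomputes each cumulative parent prefix independently as a pipe-join of a slice, in one comprehension.
-- intended difference: On codes that start with a pipe and contain at least two pipes (a leading empty segment with >=3 segments) A's truthiness-tested accumulator silently drops the leading empty segment, returning e.g. ['', 'a'] for '|a|b', while B returns the true cumulative prefixes ['', '|a'], which are the actual parent codes (each a prefix of the child code). — e.g. on parse_parent_code("|a|b"): A returns ["", "a"], B returns ["", "|a"]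
import Mathlib
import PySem

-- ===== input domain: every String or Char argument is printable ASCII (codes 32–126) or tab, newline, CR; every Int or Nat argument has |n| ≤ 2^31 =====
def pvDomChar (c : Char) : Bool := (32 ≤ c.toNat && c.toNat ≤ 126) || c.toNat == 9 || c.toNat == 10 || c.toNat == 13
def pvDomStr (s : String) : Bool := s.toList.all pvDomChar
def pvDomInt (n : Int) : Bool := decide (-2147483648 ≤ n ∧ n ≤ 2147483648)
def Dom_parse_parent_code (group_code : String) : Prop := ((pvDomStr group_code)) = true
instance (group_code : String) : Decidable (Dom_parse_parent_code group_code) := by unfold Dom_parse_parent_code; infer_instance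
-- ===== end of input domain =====

-- B replaces A's running accumulator (and its early return) with an independent pipe-join of each
-- slice in one comprehension (idiomatic); on codes with a leading empty segment and ≥3 segments
-- the two differ (see D_ below), elsewhere they agree.

-- ===== PORT A =====
-- loop body of A: extend-the-accumulator-if-nonempty, then append it to res
def pvStepA (st : String × List String) (one : String) : String × List String :=
  let prev := if st.1 ≠ "" then st.1 ++ "|" ++ one else one
  (prev, st.2 ++ [prev])

def parse_parent_code (group_code : String) : List String :=
  let code_list := (PySem.Str.split? group_code "|").getD []   -- sep "|" ≠ "", so split? is always some
  if code_list.length = 1 then []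
  else ((PySem.List.slice code_list none (some (-1))).foldl pvStepA ("", [])).2

-- ===== PORT B =====
def parse_parent_code_alt (group_code : String) : List String :=
  let code_list := (PySem.Str.split? group_code "|").getD []
  (PySem.List.pyRange 0 ((code_list.length : Int) - 1)).map
    (fun i => PySem.Str.join "|" (PySem.List.slice code_list none (some (i + 1))))

-- ===== PRECONDITION & SPEC =====
-- On codes that start with a pipe and contain at least two pipes (a leading empty segment with
-- ≥3 segments), A's truthiness-tested accumulator silently drops the leading empty segment
-- (e.g. "|a|b" ↦ ["", "a"]), while B returns the true cumulative prefixes (["", "|a"]) —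
-- actual prefixes of the child code, which is the intended value.
def D_parse_parent_code (group_code : String) : Prop :=
  PySem.Str.startswith group_code "|" = true ∧ 2 ≤ PySem.Str.count group_code "|"
instance (group_code : String) : Decidable (D_parse_parent_code group_code) := by
  unfold D_parse_parent_code; infer_instance

def Spec_parse_parent_code (group_code : String) (out : List String) : Prop :=
  ¬ D_parse_parent_code group_code → out = parse_parent_code_alt group_code
instance (group_code : String) (out : List String) : Decidable (Spec_parse_parent_code group_code out) := by
  unfold Spec_parse_parent_code; infer_instance

def pvDiffWitness_parse_parent_code : String := "|a|b"
def pvDiffWitnessOut_parse_parent_code : (List String) × (List String) := (["", "a"], ["", "|a"])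

-- ===== CLAIM (what is proved, stated in full; the proofs are below) =====
def Claim_unchanged_parse_parent_code : Prop := ∀ (group_code : String), Dom_parse_parent_code group_code → Spec_parse_parent_code group_code (parse_parent_code group_code)
def Claim_changed_parse_parent_code : Prop := Dom_parse_parent_code (pvDiffWitness_parse_parent_code) ∧ D_parse_parent_code (pvDiffWitness_parse_parent_code) ∧ parse_parent_code (pvDiffWitness_parse_parent_code) = pvDiffWitnessOut_parse_parent_code.1 ∧ parse_parent_code_alt (pvDiffWitness_parse_parent_code) = pvDiffWitnessOut_parse_parent_code.2 ∧ pvDiffWitnessOut_parse_parent_code.1 ≠ pvDiffWitnessOut_parse_parent_code.2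
def Claim_exact_parse_parent_code : Prop := ∀ (group_code : String), Dom_parse_parent_code group_code → D_parse_parent_code group_code → parse_parent_code group_code ≠ parse_parent_code_alt group_code

-- ===== LEMMAS AND PROOFS =====

-- the '|'-joins of the nonempty proper prefixes of cl (common reference shape for both sides)
def pvPrefixJoins (cl : List String) : List String :=
  (List.range (cl.length - 1)).map (fun k => PySem.Str.join "|" (cl.take (k + 1)))

-- A's body, zeta-reduced
def pvBodyA (cl : List String) : List String :=
  if cl.length = 1 then []
  else ((PySem.List.slice cl none (some (-1))).foldl pvStepA ("", [])).2

theorem pvA_eq (gc : String) :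
    parse_parent_code gc = pvBodyA ((PySem.Str.split? gc "|").getD []) := rfl


def pvSplitC (cur : List Char) : List Char → List (List Char)
  | [] => [cur]
  | x :: xs => if x = '|' then cur :: pvSplitC [] xs else pvSplitC (cur ++ [x]) xs

theorem pvGo (l : List Char) : ∀ (fuel : Nat) (cur : List Char) (acc : List (List Char)),
    l.length < fuel →
    PySem.Chars.splitOn.go ['|'] fuel l cur acc = acc.reverse ++ pvSplitC cur.reverse l := by
  induction l with
  | nil =>
      intro fuel cur acc h
      cases fuel with
      | zero => omega
      | succ f => simp [PySem.Chars.splitOn.go, pvSplitC]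
  | cons x xs ih =>
      intro fuel cur acc h
      cases fuel with
      | zero => omega
      | succ f =>
        rw [PySem.Chars.splitOn.go]
        by_cases hx : x = '|'
        · subst hx
          rw [if_pos (by simp [List.isPrefixOf]),
            show List.drop ['|'].length ('|' :: xs) = xs from rfl,
            ih f _ _ (by simpa using h)]
          simp [pvSplitC]
        · rw [if_neg (by simp [List.isPrefixOf, Ne.symm hx]), ih f _ _ (by simpa using h)]
          simp [pvSplitC, hx]

theorem pvSplitOn_eq (s : List Char) : PySem.Chars.splitOn s ['|'] = pvSplitC [] s := by
  rw [PySem.Chars.splitOn]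
  simpa using pvGo s (s.length + 1) [] [] (by omega)

theorem pvCountGo (l : List Char) : ∀ (fuel : Nat) (acc : Nat), l.length ≤ fuel →
    PySem.Chars.count.go ['|'] fuel l acc = acc + l.count '|' := by
  induction l with
  | nil =>
      intro fuel acc h
      cases fuel <;> simp [PySem.Chars.count.go]
  | cons x xs ih =>
      intro fuel acc h
      cases fuel with
      | zero => simp at h
      | succ f =>
        rw [PySem.Chars.count.go]
        by_cases hx : x = '|'
        · subst hx
          rw [if_pos (by simp [List.isPrefixOf]),
            show List.drop ['|'].length ('|' :: xs) = xs from rfl,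
            ih f _ (by simpa using h)]
          simp; omega
        · rw [if_neg (by simp [List.isPrefixOf, Ne.symm hx]), ih f _ (by simpa using h)]
          simp [hx]

theorem pvCount_eq (s : List Char) : PySem.Chars.count s ['|'] = s.count '|' := by
  rw [PySem.Chars.count]
  simpa using pvCountGo s s.length 0 le_rfl

theorem pvSplitC_length (l : List Char) : ∀ cur, (pvSplitC cur l).length = l.count '|' + 1 := by
  induction l with
  | nil => intro cur; simp [pvSplitC]
  | cons x xs ih =>
      intro cur
      by_cases hx : x = '|' <;> simp [pvSplitC, hx, ih]

theorem pvSplitC_head (l : List Char) : ∀ cur,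
    (pvSplitC cur l).head? = some (cur ++ l.takeWhile (· ≠ '|')) := by
  induction l with
  | nil => intro cur; simp [pvSplitC]
  | cons x xs ih =>
      intro cur
      by_cases hx : x = '|' <;> simp [pvSplitC, hx, ih]

theorem pvD_iff (gc : String) :
    D_parse_parent_code gc ↔
      (3 ≤ ((PySem.Str.split? gc "|").getD []).length ∧
       ((PySem.Str.split? gc "|").getD []).head? = some "") := by
  unfold D_parse_parent_code
  have hcl : (PySem.Str.split? gc "|").getD [] = (pvSplitC [] gc.toList).map String.ofList := by
    simp [PySem.Str.split?, PySem.Chars.split?, pvSplitOn_eq]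
  rw [hcl, List.length_map, pvSplitC_length, List.head?_map, pvSplitC_head]
  have hsw : PySem.Str.startswith gc "|" = PySem.Chars.startswith gc.toList ['|'] := by simp
  have hct : PySem.Str.count gc "|" = PySem.Chars.count gc.toList ['|'] := by simp
  rw [hsw, hct, pvCount_eq]
  cases hs : gc.toList with
  | nil => simp [PySem.Chars.startswith, List.isPrefixOf]
  | cons x xs =>
      by_cases hx : x = '|'
      · subst hx
        simp [PySem.Chars.startswith, List.isPrefixOf]
      · simp [PySem.Chars.startswith, List.isPrefixOf, Ne.symm hx, hx]

theorem pvJoin_single (p : String) : PySem.Str.join "|" [p] = p := by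
  apply String.toList_injective
  simp [PySem.Str.toList_join, PySem.Chars.join_singleton]

theorem pvJoin_pair (p x : String) : PySem.Str.join "|" [p, x] = p ++ "|" ++ x := by
  apply String.toList_injective
  simp [PySem.Str.toList_join, PySem.Chars.join_cons_cons, PySem.Chars.join_singleton]

theorem pvJoin_cons (p x : String) (xs : List String) :
    PySem.Str.join "|" ((p ++ "|" ++ x) :: xs) = PySem.Str.join "|" (p :: x :: xs) := by
  cases xs with
  | nil => simp [pvJoin_single, pvJoin_pair]
  | cons y ys =>
      apply String.toList_injective
      simp [PySem.Str.toList_join, PySem.Chars.join_cons_cons]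

theorem pvAppendBar_ne (p x : String) : p ++ "|" ++ x ≠ "" := by
  intro h
  have h' := congrArg String.toList h
  simp at h'

-- B's body over the plain list of segments equals pvPrefixJoins
theorem pvAlt_eq (gc : String) :
    parse_parent_code_alt gc = pvPrefixJoins ((PySem.Str.split? gc "|").getD []) := by
  rw [show parse_parent_code_alt gc =
        (PySem.List.pyRange 0 ((((PySem.Str.split? gc "|").getD []).length : Int) - 1)).map
          (fun i => PySem.Str.join "|"
            (PySem.List.slice ((PySem.Str.split? gc "|").getD []) none (some (i + 1)))) from rfl]
  generalize (PySem.Str.split? gc "|").getD [] = cl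
  cases cl with
  | nil =>
      have h : PySem.List.pyRange 0 (((List.length ([] : List String) : Int)) - 1) = [] := by decide
      rw [h]; rfl
  | cons a l =>
      have hn : ((a :: l).length : Int) - 1 = (((a :: l).length - 1 : Nat) : Int) := by
        simp
      rw [hn, PySem.List.pyRange_zero_natCast, List.map_map]
      refine List.map_congr_left (fun k _ => ?_)
      simp only [Function.comp_def]
      rw [show ((k : Int) + 1) = ((k + 1 : Nat) : Int) by push_cast; ring,
        PySem.List.slice_to _ (by positivity)]
      rfl

-- A's fold, started from a nonempty prefix p, produces exactly the '|'-joins of the prefixes of p :: l.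
theorem pvFoldA (l : List String) : ∀ (p : String) (acc : List String), p ≠ "" →
    l.foldl pvStepA (p, acc) =
      (PySem.Str.join "|" (p :: l),
       acc ++ (List.range l.length).map (fun i => PySem.Str.join "|" (p :: l.take (i + 1)))) := by
  induction l with
  | nil => intro p acc hp; simp [pvJoin_single]
  | cons x xs ih =>
      intro p acc hp
      have hstep : pvStepA (p, acc) x = (p ++ "|" ++ x, acc ++ [p ++ "|" ++ x]) := by
        simp [pvStepA, hp]
      rw [List.foldl_cons, hstep, ih _ _ (pvAppendBar_ne p x)]
      refine Prod.ext ?_ ?_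
      · simp [pvJoin_cons]
      · show acc ++ [p ++ "|" ++ x] ++ _ = acc ++ _
        rw [List.length_cons, List.range_succ_eq_map, List.map_cons, List.map_map,
          List.append_assoc]
        simp only [List.take_succ_cons, List.take_zero, pvJoin_pair, Function.comp_def,
          List.singleton_append, pvJoin_cons, Nat.succ_eq_add_one]

-- A's fold only appends to the result list.
theorem pvFoldA_prefix (l : List String) : ∀ (st : String × List String),
    ∃ t, (l.foldl pvStepA st).2 = st.2 ++ t := by
  induction l with
  | nil => intro st; exact ⟨[], by simp⟩
  | cons x xs ih =>
      intro st
      obtain ⟨t, ht⟩ := ih (pvStepA st x)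
      exact ⟨(pvStepA st x).2.drop st.2.length ++ t, by
        rw [List.foldl_cons, ht]; simp [pvStepA, List.append_assoc]⟩

theorem pvSlice_dropLast {α : Type} (xs : List α) :
    PySem.List.slice xs none (some (-1)) = xs.dropLast := by
  simp [PySem.List.slice, List.dropLast_eq_take]

-- the list-level equivalence outside the change region
theorem pvMain (cl : List String) (hD : ¬(3 ≤ cl.length ∧ cl.head? = some "")) :
    pvBodyA cl = pvPrefixJoins cl := by
  match cl with
  | [] => rfl
  | [c0] => rfl
  | c0 :: x :: rest =>
      unfold pvBodyA pvPrefixJoins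
      rw [if_neg (by simp), pvSlice_dropLast]
      by_cases hc0 : c0 = ""
      · -- head empty: ¬D forces exactly two segments
        have hrest : rest = [] := by
          rcases rest with _ | ⟨y, ys⟩
          · rfl
          · exact absurd ⟨by simp, by rw [hc0]; rfl⟩ hD
        subst hrest hc0
        simp [pvStepA, List.range_succ, pvJoin_single]
      · -- head nonempty: the fold invariant applies
        have hstep : pvStepA ("", []) c0 = (c0, [c0]) := by simp [pvStepA]
        rw [List.dropLast_cons_of_ne_nil (by simp), List.foldl_cons, hstep,
          pvFoldA _ c0 [c0] hc0]
        have hlen : (x :: rest).dropLast.length = rest.length := by simp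
        rw [hlen]
        show [c0] ++ _ = _
        rw [show (c0 :: x :: rest).length - 1 = rest.length + 1 by simp,
          List.range_succ_eq_map, List.map_cons, List.map_map]
        simp only [List.singleton_append]
        refine (List.cons_eq_cons.mpr ⟨?_, ?_⟩).symm
        · simp [pvJoin_single]
        · refine (List.map_congr_left (fun i hi => ?_)).symm
          have hi' : i + 1 ≤ rest.length := List.mem_range.mp hi
          have htake : (x :: rest).dropLast.take (i + 1) = (x :: rest).take (i + 1) := by
            rw [List.dropLast_eq_take, List.take_take]
            congr 1
            simp
            omega
          simp [htake]

-- the list-level disagreement everywhere inside the change region (they differ at index 1)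
theorem pvTight (cl : List String) (h3 : 3 ≤ cl.length) (hh : cl.head? = some "") :
    pvBodyA cl ≠ pvPrefixJoins cl := by
  match cl, h3 with
  | c0 :: x :: y :: rest, _ =>
      intro heq
      have hc0 : c0 = "" := by simpa using hh
      -- A's element at index 1 is x
      have hA : (pvBodyA (c0 :: x :: y :: rest))[1]? = some x := by
        unfold pvBodyA
        rw [if_neg (by simp), pvSlice_dropLast, List.dropLast_cons₂, List.foldl_cons,
          show pvStepA ("", []) c0 = ("", [""]) from by simp [pvStepA, hc0]]
        have hd : (x :: y :: rest).dropLast = x :: (y :: rest).dropLast := List.dropLast_cons₂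
        rw [hd, List.foldl_cons,
          show pvStepA ("", [""]) x = (x, ["", x]) from by simp [pvStepA]]
        obtain ⟨t, ht⟩ := pvFoldA_prefix ((y :: rest).dropLast) (x, ["", x])
        rw [ht]
        rfl
      -- B's element at index 1 is "" ++ "|" ++ x
      have hB : (pvPrefixJoins (c0 :: x :: y :: rest))[1]? = some ("" ++ "|" ++ x) := by
        unfold pvPrefixJoins
        have h1 : 1 < (c0 :: x :: y :: rest).length - 1 := by simp
        rw [List.getElem?_map, List.getElem?_range h1]
        simp [hc0, pvJoin_pair]
      rw [heq, hB] at hA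
      have h' := congrArg (Option.map String.toList) hA
      simp at h'

-- ===== VERDICT (by name: the statement is the Claim_ definition above) =====
theorem parse_parent_code_spec : Claim_unchanged_parse_parent_code := by
  intro gc _hDom hD
  show parse_parent_code gc = parse_parent_code_alt gc
  rw [pvA_eq, pvAlt_eq]
  exact pvMain _ (fun h => hD ((pvD_iff gc).mpr h))

theorem parse_parent_code_changed : Claim_changed_parse_parent_code := by
  unfold Claim_changed_parse_parent_code; decide

theorem parse_parent_code_tight : Claim_exact_parse_parent_code := by
  intro gc _hDom hD heq
  obtain ⟨h3, hh⟩ := (pvD_iff gc).mp hD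
  rw [pvA_eq, pvAlt_eq] at heq
  exact pvTight _ h3 hh heq
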